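-- pv_equiv track=rewrite | github.com/cralbers/ATOM | CIS/p71-majors.py | majors_analysis
-- ===== SOURCE A (Python) =====
-- def genFrequencyTable(aList):
--     ''' (list) -> dict
--
--     Given a list, aList, returns a dictionary with integers as keys, and
--     the frequency of the integer as the values.
--
--     >>> genFrequencyTable([1, 2, 3, 3, 1, 4, 5])
--     {1: 2, 2: 1, 3: 2, 4: 1, 5: 1}
--     >>> genFrequencyTable([1, 2, 3, 1, 2, 3, 4, 6])
--     {1: 2, 2: 2, 3: 2, 4: 1, 6: 1}
--     >>> genFrequencyTable([0])
--     {0: 1}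
--     '''
--     countDict = {}
--
--     for item in aList:
--         if item in countDict:
--             countDict[item] = countDict[item] + 1
--         else:
--             countDict[item] = 1
--
--     return countDict
--
-- def majors_analysis(majorsli):
--     ''' (list) -> tuple
--
--     Returns a tuple of the most frequently occuring majors and the
--     number of distinct majors in the list, majorsli.
--
--     >>> majors_analysis(['CIS', 'CIS', 'EXPL', 'COLT', 'EXPL'])
--     (['CIS', 'EXPL'], 3)
--     '''
--     # this is the counter for number of majors in the list
--     counter = 0
--     majorsList=[]
--     for i in majorsli:
--         if i not in majorsList:
--             majorsList.append(i)
--             counter = counter + 1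
--
--     # this is the part to get mode of data
--     countDict = genFrequencyTable(majorsli)
--
--     countList = countDict.values()
--     maxCount = max(countList)
--
--     modeList = []
--     for item in countDict:
--         if countDict[item] == maxCount:
--             modeList.append(item)
--
--     return_tuple = (modeList, counter)
--     return return_tuple
-- ===== SOURCE B (Python) =====
-- def majors_analysis(majorsli):
--     # Single frequency table built in one pass; distinct count = len(table),
--     # modes = keys with the maximal count in first-appearance order.
--     table = {}
--     for m in majorsli:
--         table[m] = table.get(m, 0) + 1
--     maxCount = max(table.values())
--     modeList = [k for k, v in table.items() if v == maxCount]
--     return (modeList, len(table))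
-- ===== Notes on version B (the rewrite author's own statement) =====
-- stated objective: simpler
-- what changed: B builds one frequency table in a single pass and derives the distinct count as len(table) and the modes as a comprehension over table.items(), eliminating A's separate dedup-list membership-scan loop and the key-by-key lookup loop.
import Mathlib
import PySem

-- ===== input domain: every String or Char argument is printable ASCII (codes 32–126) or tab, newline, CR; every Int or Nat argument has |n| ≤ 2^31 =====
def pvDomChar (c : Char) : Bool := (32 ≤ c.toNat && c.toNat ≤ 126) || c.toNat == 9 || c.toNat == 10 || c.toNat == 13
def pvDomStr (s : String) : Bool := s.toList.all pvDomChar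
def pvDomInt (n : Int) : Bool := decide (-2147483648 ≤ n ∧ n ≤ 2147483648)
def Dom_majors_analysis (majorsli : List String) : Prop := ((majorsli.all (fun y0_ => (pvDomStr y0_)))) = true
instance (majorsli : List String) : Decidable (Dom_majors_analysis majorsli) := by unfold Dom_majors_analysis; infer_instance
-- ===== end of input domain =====

-- B replaces A's dedup-list membership loop and key-by-key lookup loop with one frequency
-- table, len(table) and an items() comprehension (objective: simpler).
-- Both A and B raise ValueError (max of empty sequence) on [], excluded by Pre_.

-- ===== PORT A =====
-- 'countDict[item] + 1' is ported as getD item 0 + 1: exact, since the branch guarantees the key is present.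
def genFrequencyTable (aList : List String) : PySem.Dict String Int :=
  aList.foldl
    (fun countDict item =>
      if countDict.contains item then countDict.insert item (countDict.getD item 0 + 1)
      else countDict.insert item 1)
    PySem.Dict.empty

def majors_analysis (majorsli : List String) : List String × Int :=
  let st := majorsli.foldl
    (fun (st : Int × List String) i =>
      if i ∈ st.2 then st else (st.1 + 1, st.2 ++ [i]))
    (0, [])
  let countDict := genFrequencyTable majorsli
  let countList := countDict.values
  -- max(countList): raises on empty input, excluded by Pre_; getD 0 is a total stand-in there.
  let maxCount := (PySem.List.max? countList (fun y => y)).getD 0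
  let modeList := countDict.keys.foldl
    (fun modeList item =>
      if countDict.getD item 0 == maxCount then modeList ++ [item] else modeList)
    []
  (modeList, st.1)

-- ===== PORT B =====
def majors_analysis_alt (majorsli : List String) : List String × Int :=
  let table : PySem.Dict String Int := majorsli.foldl (fun d m => d.insert m (d.getD m 0 + 1)) PySem.Dict.empty
  let maxCount := (PySem.List.max? table.values (fun y => y)).getD 0
  let modeList := (table.items.filter (fun kv => kv.2 == maxCount)).map Prod.fst
  (modeList, (table.size : Int))

-- ===== PRECONDITION & SPEC =====
-- Pre_ excludes only the empty list, on which A raises ValueError (max() of empty sequence).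
def Pre_majors_analysis (majorsli : List String) : Prop := majorsli ≠ []
instance (majorsli : List String) : Decidable (Pre_majors_analysis majorsli) := by
  unfold Pre_majors_analysis; infer_instance
def pvWitness_majors_analysis : List String := (["CIS", "CIS", "EXPL"])

def Spec_majors_analysis (majorsli : List String) (out : List String × Int) : Prop := out = majors_analysis_alt majorsli
instance (majorsli : List String) (out : List String × Int) : Decidable (Spec_majors_analysis majorsli out) := by unfold Spec_majors_analysis; infer_instance

-- ===== CLAIM (what is proved, stated in full; the proofs are below) =====
def Claim_equal_majors_analysis : Prop := ∀ (majorsli : List String), Dom_majors_analysis majorsli → Pre_majors_analysis majorsli → Spec_majors_analysis majorsli (majors_analysis majorsli)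

-- ===== LEMMAS AND PROOFS =====

-- A's two-branch frequency loop computes the same dict as B's one-line counting loop.
theorem genFrequencyTable_eq (aList : List String) :
    genFrequencyTable aList
      = aList.foldl (fun d m => d.insert m (d.getD m 0 + 1)) PySem.Dict.empty := by
  unfold genFrequencyTable
  apply PySem.List.foldl_congr_mem
  intro d item _
  by_cases h : d.contains item
  · simp [h]
  · simp [h, PySem.Dict.getD_of_not_contains d (0 : Int) (by simpa using h)]

-- A's dedup loop maintains: the list is Set.update of the seed, the counter its length.
theorem dedup_fold (l : List String) (s : List String) (c : Int) (hc : c = s.length) :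
    l.foldl (fun (st : Int × List String) i =>
        if i ∈ st.2 then st else (st.1 + 1, st.2 ++ [i])) (c, s)
      = (((PySem.Set.update s l).length : Int), PySem.Set.update s l) := by
  induction l generalizing s c with
  | nil => simp [PySem.Set.update_nil, hc]
  | cons x t ih =>
    by_cases hx : x ∈ s
    · simpa [List.foldl_cons, hx, PySem.Set.update_cons, PySem.Set.add_of_mem hx]
        using ih s c hc
    · simpa [List.foldl_cons, hx, PySem.Set.update_cons, PySem.Set.add_of_not_mem hx]
        using ih (s ++ [x]) (c + 1) (by simp [hc])

-- ===== VERDICT (by name: the statement is the Claim_ definition above) =====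
theorem majors_analysis_spec : Claim_equal_majors_analysis := by
  intro majorsli _ _
  unfold Spec_majors_analysis majors_analysis majors_analysis_alt
  dsimp only
  rw [genFrequencyTable_eq, dedup_fold majorsli [] 0 (by simp), PySem.Set.update_nil_left]
  simp only [PySem.Dict.foldl_insert_getD_add_one_eq_counter]
  congr 1
  · -- mode list: key loop = filtered items mapped to keys
    refine (PySem.List.foldl_append_if_eq_filter _ _ _).trans ?_
    rw [PySem.Dict.items_counter, List.filter_map, PySem.Dict.keys_counter]
    simp [Function.comp_def, PySem.Dict.getD_counter]
  · -- distinct count: dedup counter = number of keys = size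
    simp [PySem.Dict.size, PySem.Dict.items_counter]
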